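-- pv_equiv track=rewrite | github.com/pypi-data/pypi-mirror-223 | packages/hexchecker/hexchecker-0.0.4.tar.gz/hexchecker-0.0.4/src/hexchecker/hexchecker.py | hexcheckerUpper
-- ===== SOURCE A (Python) =====
-- def hexcheckerUpper(string):
--     """
--     Returns True if string is valid hexidecimal with uppercase characters, else returns False.
--     """
--     for character in string:
--         if '0' <= character <= '9':
--             continue
--         if 'A' <= character <= 'F':
--             continue
--         return False
--     return True
-- ===== SOURCE B (Python) =====
-- def hexcheckerUpper(string):
--     """
--     Returns True if string is valid hexidecimal with uppercase characters, else returns False.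
--     """
--     return set(string) <= set("0123456789ABCDEF")
-- ===== Notes on version B (the rewrite author's own statement) =====
-- stated objective: simpler
-- what changed: Replaces the per-character loop with two range branches by building the set of distinct characters and testing it as a subset of the fixed uppercase-hex alphabet.
import Mathlib
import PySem

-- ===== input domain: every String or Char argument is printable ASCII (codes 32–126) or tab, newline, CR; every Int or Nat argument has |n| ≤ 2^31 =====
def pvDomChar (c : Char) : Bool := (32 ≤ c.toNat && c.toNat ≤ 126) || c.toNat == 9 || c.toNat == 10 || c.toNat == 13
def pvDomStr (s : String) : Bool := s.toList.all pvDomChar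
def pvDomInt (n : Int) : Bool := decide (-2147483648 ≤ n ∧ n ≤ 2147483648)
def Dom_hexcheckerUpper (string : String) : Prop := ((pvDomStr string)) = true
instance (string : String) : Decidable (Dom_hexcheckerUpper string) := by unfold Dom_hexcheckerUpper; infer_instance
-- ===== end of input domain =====

-- B replaces A's short-circuiting per-character range scan by a set-of-distinct-characters
-- subset test against the fixed uppercase-hex alphabet (objective: simpler).

-- ===== PORT A =====
-- the for-loop with early 'return False': structural recursion over the characters
def hexcheckerUpperLoop : List Char → Bool
  | [] => true
  | c :: rest =>
    if '0' ≤ c ∧ c ≤ '9' then hexcheckerUpperLoop rest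
    else if 'A' ≤ c ∧ c ≤ 'F' then hexcheckerUpperLoop rest
    else false

def hexcheckerUpper (string : String) : Bool := hexcheckerUpperLoop string.toList

-- ===== PORT B =====
def hexcheckerUpper_alt (string : String) : Bool :=
  PySem.Set.issubset (PySem.Set.ofList string.toList)
    (PySem.Set.ofList "0123456789ABCDEF".toList)

-- ===== PRECONDITION & SPEC =====
def Spec_hexcheckerUpper (string : String) (out : Bool) : Prop := out = hexcheckerUpper_alt string
instance (string : String) (out : Bool) : Decidable (Spec_hexcheckerUpper string out) := by unfold Spec_hexcheckerUpper; infer_instance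

-- ===== CLAIM (what is proved, stated in full; the proofs are below) =====
def Claim_equal_hexcheckerUpper : Prop := ∀ (string : String), Dom_hexcheckerUpper string → Spec_hexcheckerUpper string (hexcheckerUpper string)

-- ===== LEMMAS AND PROOFS =====
def pvHexAlpha : List Char := "0123456789ABCDEF".toList

theorem char_eq_iff (c d : Char) : c = d ↔ c.toNat = d.toNat :=
  ⟨fun h => by rw [h], fun h => Char.ext (UInt32.toNat_inj.mp h)⟩

theorem char_le_iff (c d : Char) : (c ≤ d) ↔ c.toNat ≤ d.toNat := by
  rw [Char.le_def, UInt32.le_iff_toNat_le]; rfl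

theorem mem_alpha_iff (c : Char) :
    c ∈ pvHexAlpha ↔ (('0' ≤ c ∧ c ≤ '9') ∨ ('A' ≤ c ∧ c ≤ 'F')) := by
  simp only [pvHexAlpha, char_eq_iff, char_le_iff,
    show ("0123456789ABCDEF".toList) = ['0','1','2','3','4','5','6','7','8','9','A','B','C','D','E','F'] from rfl,
    List.mem_cons, List.not_mem_nil, or_false,
    show ('0':Char).toNat = 48 from rfl, show ('1':Char).toNat = 49 from rfl, show ('2':Char).toNat = 50 from rfl, show ('3':Char).toNat = 51 from rfl, show ('4':Char).toNat = 52 from rfl, show ('5':Char).toNat = 53 from rfl, show ('6':Char).toNat = 54 from rfl, show ('7':Char).toNat = 55 from rfl, show ('8':Char).toNat = 56 from rfl, show ('9':Char).toNat = 57 from rfl, show ('A':Char).toNat = 65 from rfl, show ('B':Char).toNat = 66 from rfl, show ('C':Char).toNat = 67 from rfl, show ('D':Char).toNat = 68 from rfl, show ('E':Char).toNat = 69 from rfl, show ('F':Char).toNat = 70 from rfl]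
  omega

theorem loop_eq_all (l : List Char) :
    hexcheckerUpperLoop l = l.all (· ∈ pvHexAlpha) := by
  induction l with
  | nil => rfl
  | cons c rest ih =>
    simp only [hexcheckerUpperLoop, List.all_cons, ih]
    by_cases h1 : '0' ≤ c ∧ c ≤ '9'
    · simp [h1, (mem_alpha_iff c).2 (Or.inl h1)]
    · by_cases h2 : 'A' ≤ c ∧ c ≤ 'F'
      · simp [h1, h2, (mem_alpha_iff c).2 (Or.inr h2)]
      · have : c ∉ pvHexAlpha := by
          intro hm; rcases (mem_alpha_iff c).1 hm with h|h
          · exact h1 h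
          · exact h2 h
        simp [h1, h2, this]

-- ===== VERDICT (by name: the statement is the Claim_ definition above) =====
theorem hexcheckerUpper_spec : Claim_equal_hexcheckerUpper := by
  intro s _
  unfold Spec_hexcheckerUpper hexcheckerUpper hexcheckerUpper_alt
  rw [loop_eq_all, Bool.eq_iff_iff]
  simp only [List.all_eq_true, PySem.Set.issubset_iff, PySem.Set.mem_ofList, decide_eq_true_eq,
    pvHexAlpha]
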